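-- pv_equiv track=rewrite | github.com/kabeier/WaxWatchApi | scripts/check_env_sample.py | parse_ci_run_commands
-- ===== SOURCE A (Python) =====
-- def parse_ci_run_commands(content: str) -> set[str]:
--     commands: set[str] = set()
--     lines = content.splitlines()
--     i = 0
--     while i < len(lines):
--         raw_line = lines[i]
--         stripped = raw_line.strip()
--         if stripped.startswith("run:"):
--             run_value = stripped[len("run:") :].strip()
--             if run_value and run_value != "|":
--                 commands.add(run_value)
--             elif run_value == "|":
--                 block_indent = len(raw_line) - len(raw_line.lstrip())
--                 i += 1
--                 while i < len(lines):
--                     block_line = lines[i]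
--                     if not block_line.strip():
--                         i += 1
--                         continue
--                     indent = len(block_line) - len(block_line.lstrip())
--                     if indent <= block_indent:
--                         i -= 1
--                         break
--                     commands.add(block_line.strip())
--                     i += 1
--         i += 1
--     return commands
-- ===== SOURCE B (Python) =====
-- def parse_ci_run_commands(content: str) -> set[str]:
--     commands: set[str] = set()
--     lines = content.splitlines()
--     while lines:
--         head, rest = lines[0], lines[1:]
--         stripped = head.strip()
--         if stripped.startswith("run:"):
--             value = stripped[4:].strip()
--             if value == "|":
--                 d = len(head) - len(head.lstrip())
--                 k = next((j for j, l in enumerate(rest)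
--                           if l.strip() and len(l) - len(l.lstrip()) <= d), len(rest))
--                 commands.update(l.strip() for l in rest[:k] if l.strip())
--                 rest = rest[k:]
--             elif value:
--                 commands.add(value)
--         lines = rest
--     return commands
-- ===== Notes on version B (the rewrite author's own statement) =====
-- stated objective: alternative
-- what changed: Replaced A's index-based nested while loops (inner block loop with an i -= 1 backtrack) by a worklist over the remaining-lines list: each block scalar is consumed in one step by computing its extent k with a generator search and bulk-adding the stripped non-blank lines of rest[:k], then continuing on rest[k:].
import Mathlib
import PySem

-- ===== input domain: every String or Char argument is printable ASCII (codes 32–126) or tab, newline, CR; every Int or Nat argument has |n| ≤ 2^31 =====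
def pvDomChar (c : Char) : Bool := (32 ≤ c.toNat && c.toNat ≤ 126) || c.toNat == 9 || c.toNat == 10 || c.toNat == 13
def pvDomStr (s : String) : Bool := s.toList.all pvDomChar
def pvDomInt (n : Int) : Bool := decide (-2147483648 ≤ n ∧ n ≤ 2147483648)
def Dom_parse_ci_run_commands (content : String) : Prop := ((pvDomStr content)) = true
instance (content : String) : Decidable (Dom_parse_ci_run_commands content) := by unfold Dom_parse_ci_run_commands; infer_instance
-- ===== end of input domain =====

-- B replaces A's index-driven nested while loops (with an i -= 1 backtrack) by a
-- worklist over the remaining-lines list: a block scalar is consumed in one step by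
-- computing its extent k and bulk-adding the stripped non-blank lines of rest[:k].
-- Python returns a set, modelled as the insertion-ordered duplicate-free PySem.Set.

-- len(s) - len(s.lstrip()): number of leading whitespace characters (shared helper)
def pyIndent (s : String) : Int := PySem.Str.len s - PySem.Str.len (PySem.Str.lstrip s)

-- stripped[len("run:"):].strip() (shared helper)
def pyRunValue (stripped : String) : String :=
  PySem.Str.strip (PySem.Str.slice stripped (some 4) none)

-- ===== PORT A =====
-- inner while loop of A: returns (final i, accumulated commands); the caller resumes at
-- final i + 1.  The fuel argument only makes the loop structurally recursive: with
-- fuel > lines.length - i (as at every call site) it never runs out.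
def pvAinner (lines : List String) (bi : Int) :
    Nat → Nat → PySem.Set String → Nat × PySem.Set String
  | 0, i, acc => (i, acc)
  | fuel+1, i, acc =>
    if h : i < lines.length then
      if PySem.Str.strip lines[i] = "" then pvAinner lines bi fuel (i+1) acc
      else if pyIndent lines[i] ≤ bi then (i - 1, acc)
      else pvAinner lines bi fuel (i+1) (PySem.Set.add acc (PySem.Str.strip lines[i]))
    else (i, acc)

-- outer while loop of A (fuel as above: never exhausted at the call site)
def pvAouter (lines : List String) :
    Nat → Nat → PySem.Set String → PySem.Set String
  | 0, _, acc => acc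
  | fuel+1, i, acc =>
    if h : i < lines.length then
      if PySem.Str.startswith (PySem.Str.strip lines[i]) "run:" then
        if pyRunValue (PySem.Str.strip lines[i]) ≠ "" ∧
            pyRunValue (PySem.Str.strip lines[i]) ≠ "|" then
          pvAouter lines fuel (i+1) (PySem.Set.add acc (pyRunValue (PySem.Str.strip lines[i])))
        else if pyRunValue (PySem.Str.strip lines[i]) = "|" then
          pvAouter lines fuel
            ((pvAinner lines (pyIndent lines[i]) lines.length (i+1) acc).1 + 1)
            (pvAinner lines (pyIndent lines[i]) lines.length (i+1) acc).2
        else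
          pvAouter lines fuel (i+1) acc
      else
        pvAouter lines fuel (i+1) acc
    else acc

def parse_ci_run_commands (content : String) : List String :=
  pvAouter (PySem.Str.splitlines content)
    ((PySem.Str.splitlines content).length + 1) 0 PySem.Set.empty

-- ===== PORT B =====
-- k = next((j for j, l in enumerate(rest) if l.strip() and indent(l) <= d), len(rest))
def pvBfindK : List String → Int → Nat
  | [], _ => 0
  | l :: ls, d =>
    if PySem.Str.strip l ≠ "" ∧ pyIndent l ≤ d then 0 else pvBfindK ls d + 1

-- commands.update(l.strip() for l in rest[:k] if l.strip())
def pyBlockAdd (cmds : PySem.Set String) (block : List String) : PySem.Set String :=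
  ((block.filter (fun l => PySem.Str.strip l ≠ "")).map PySem.Str.strip).foldl
    PySem.Set.add cmds

-- B's while loop over the remaining-lines worklist.  The fuel argument only makes the
-- loop structurally recursive: with fuel > lines.length (as at the call site and as
-- every step maintains, each step consuming at least one line) it never runs out.
def pvBloop : Nat → List String → PySem.Set String → PySem.Set String
  | _, [], cmds => cmds
  | 0, _ :: _, cmds => cmds
  | fuel+1, head :: rest, cmds =>
    if PySem.Str.startswith (PySem.Str.strip head) "run:" then
      if pyRunValue (PySem.Str.strip head) = "|" then
        pvBloop fuel (rest.drop (pvBfindK rest (pyIndent head)))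
          (pyBlockAdd cmds (rest.take (pvBfindK rest (pyIndent head))))
      else if pyRunValue (PySem.Str.strip head) ≠ "" then
        pvBloop fuel rest (PySem.Set.add cmds (pyRunValue (PySem.Str.strip head)))
      else pvBloop fuel rest cmds
    else pvBloop fuel rest cmds

def parse_ci_run_commands_alt (content : String) : List String :=
  pvBloop ((PySem.Str.splitlines content).length + 1) (PySem.Str.splitlines content)
    PySem.Set.empty

-- ===== PRECONDITION & SPEC =====
def Spec_parse_ci_run_commands (content : String) (out : List String) : Prop := out = parse_ci_run_commands_alt content
instance (content : String) (out : List String) : Decidable (Spec_parse_ci_run_commands content out) := by unfold Spec_parse_ci_run_commands; infer_instance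

-- ===== CLAIM (what is proved, stated in full; the proofs are below) =====
def Claim_equal_parse_ci_run_commands : Prop := ∀ (content : String), Dom_parse_ci_run_commands content → Spec_parse_ci_run_commands content (parse_ci_run_commands content)

-- ===== LEMMAS AND PROOFS =====

-- A's inner loop, characterised by B's block extent k: it stops right before index
-- i + k and accumulates exactly the stripped non-blank lines of the block prefix.
theorem pv_inner_char (lines : List String) (d : Int) :
    ∀ fuel i acc, lines.length - i < fuel →
      pvAinner lines d fuel i acc =
        ((if i + pvBfindK (lines.drop i) d < lines.length then
            i + pvBfindK (lines.drop i) d - 1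
          else i + pvBfindK (lines.drop i) d),
         pyBlockAdd acc ((lines.drop i).take (pvBfindK (lines.drop i) d))) := by
  intro fuel
  induction fuel with
  | zero => intro i acc h; omega
  | succ f ih =>
    intro i acc h
    by_cases hi : i < lines.length
    · have hdrop : lines.drop i = lines[i] :: lines.drop (i+1) :=
        List.drop_eq_getElem_cons hi
      have hKcons : pvBfindK (lines.drop i) d =
          if PySem.Str.strip lines[i] ≠ "" ∧ pyIndent lines[i] ≤ d then 0
          else pvBfindK (lines.drop (i+1)) d + 1 := by
        rw [hdrop, pvBfindK]
      rw [pvAinner, dif_pos hi]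
      by_cases hblank : PySem.Str.strip lines[i] = ""
      · have hk : pvBfindK (lines.drop i) d = pvBfindK (lines.drop (i+1)) d + 1 := by
          rw [hKcons, if_neg (by simp [hblank])]
        rw [if_pos hblank, ih (i+1) acc (by omega), hk]
        refine Prod.ext ?_ ?_
        · have : i + (pvBfindK (lines.drop (i+1)) d + 1)
              = i + 1 + pvBfindK (lines.drop (i+1)) d := by omega
          rw [this]
        · show pyBlockAdd acc _ = pyBlockAdd acc _
          rw [hdrop, List.take_succ_cons]
          unfold pyBlockAdd
          rw [List.filter_cons_of_neg (by simp [hblank])]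
      · by_cases hind : pyIndent lines[i] ≤ d
        · have hk : pvBfindK (lines.drop i) d = 0 := by
            rw [hKcons, if_pos ⟨hblank, hind⟩]
          rw [if_neg hblank, if_pos hind, hk]
          simp [pyBlockAdd, hi]
        · have hk : pvBfindK (lines.drop i) d = pvBfindK (lines.drop (i+1)) d + 1 := by
            rw [hKcons, if_neg (fun hc => hind hc.2)]
          rw [if_neg hblank, if_neg hind,
            ih (i+1) (PySem.Set.add acc (PySem.Str.strip lines[i])) (by omega), hk]
          refine Prod.ext ?_ ?_
          · have : i + (pvBfindK (lines.drop (i+1)) d + 1)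
                = i + 1 + pvBfindK (lines.drop (i+1)) d := by omega
            rw [this]
          · show pyBlockAdd _ _ = pyBlockAdd acc _
            rw [hdrop, List.take_succ_cons]
            unfold pyBlockAdd
            rw [List.filter_cons_of_pos (by simp [hblank]), List.map_cons, List.foldl_cons]
    · have hdrop : lines.drop i = [] := List.drop_eq_nil_of_le (by omega)
      rw [pvAinner, dif_neg hi, hdrop]
      simp [pvBfindK, pyBlockAdd]
      omega

-- main invariant: A's outer loop from index i equals B's worklist loop on lines.drop i
theorem pv_main (lines : List String) :
    ∀ n i acc, lines.length - i ≤ n → ∀ fuel fuelB, lines.length - i < fuel →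
      lines.length - i < fuelB → pvAouter lines fuel i acc = pvBloop fuelB (lines.drop i) acc := by
  intro n
  induction n with
  | zero =>
    intro i acc hle fuel fuelB hf hfB
    match fuel, hf with
    | f+1, _ =>
      rw [pvAouter, dif_neg (show ¬ i < lines.length by omega),
        List.drop_eq_nil_of_le (by omega)]
      match fuelB with
      | g+1 => rw [pvBloop]
  | succ n ih =>
    intro i acc hle fuel fuelB hf hfB
    by_cases hi : i < lines.length
    · have hdrop : lines.drop i = lines[i] :: lines.drop (i+1) :=
        List.drop_eq_getElem_cons hi
      match fuel, hf with
      | f+1, _ =>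
      match fuelB, hfB with
      | g+1, _ =>
      rw [pvAouter, dif_pos hi, hdrop, pvBloop]
      by_cases hsw : PySem.Str.startswith (PySem.Str.strip lines[i]) "run:" = true
      · rw [if_pos hsw, if_pos hsw]
        by_cases h1 : pyRunValue (PySem.Str.strip lines[i]) ≠ "" ∧
            pyRunValue (PySem.Str.strip lines[i]) ≠ "|"
        · rw [if_pos h1, if_neg h1.2, if_pos h1.1]
          exact ih (i+1) _ (by omega) f g (by omega) (by omega)
        · rw [if_neg h1]
          by_cases h2 : pyRunValue (PySem.Str.strip lines[i]) = "|"
          · have hI := pv_inner_char lines (pyIndent lines[i]) lines.length (i+1) acc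
              (by omega)
            set k := pvBfindK (lines.drop (i+1)) (pyIndent lines[i]) with hk
            set accB := pyBlockAdd acc ((lines.drop (i+1)).take k) with haccB
            rw [if_pos h2, if_pos h2, hI]
            dsimp only
            have hB : (lines.drop (i+1)).drop k = lines.drop (i+1+k) := by
              rw [List.drop_drop, Nat.add_comm]
            by_cases hterm : i + 1 + k < lines.length
            · rw [if_pos hterm, show i + 1 + k - 1 + 1 = i + 1 + k by omega,
                ih (i+1+k) accB (by omega) f g (by omega) (by omega), hB]
            · rw [if_neg hterm, ih (i+1+k+1) accB (by omega) f g (by omega) (by omega), hB]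
              have e1 : lines.drop (i+1+k+1) = [] := List.drop_eq_nil_of_le (by omega)
              have e2 : lines.drop (i+1+k) = [] := List.drop_eq_nil_of_le (by omega)
              rw [e1, e2]
          · have hv : pyRunValue (PySem.Str.strip lines[i]) = "" := by
              by_contra hne; exact h1 ⟨hne, h2⟩
            rw [if_neg h2, if_neg h2, if_neg (not_not_intro hv)]
            exact ih (i+1) _ (by omega) f g (by omega) (by omega)
      · rw [if_neg hsw, if_neg hsw]
        exact ih (i+1) _ (by omega) f g (by omega) (by omega)
    · match fuel, hf with
      | f+1, _ =>
        rw [pvAouter, dif_neg hi, List.drop_eq_nil_of_le (by omega)]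
        match fuelB with
        | g+1 => rw [pvBloop]

-- ===== VERDICT (by name: the statement is the Claim_ definition above) =====
theorem parse_ci_run_commands_spec : Claim_equal_parse_ci_run_commands := by
  intro content _
  unfold Spec_parse_ci_run_commands parse_ci_run_commands parse_ci_run_commands_alt
  have := pv_main (PySem.Str.splitlines content) (PySem.Str.splitlines content).length 0
    PySem.Set.empty (by omega) ((PySem.Str.splitlines content).length + 1)
    ((PySem.Str.splitlines content).length + 1) (by omega) (by omega)
  simpa using this
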